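-- pv_equiv track=rewrite | github.com/vinitus/algorithm_problem | SWEA/1226_미로1/test.py | Count_Zero
-- ===== SOURCE A (Python) =====
-- def Count_Zero(tmp_list):                       # 0의 갯수를 세는 함수
--     count_zero = 0
--     three = False                               # 3은 도착을 의미, 이를 판별하기 위한 변수
--     for i in tmp_list:
--         if (i == 0):
--             count_zero += 1
--         elif (i == 3):                          # 4방위 중 3을 만나면
--             three = True                        # 네
--             break
--     if three:                                   # 3만나면
--         return -1                               # -1 리턴
--     else:
--         return count_zero                       # 3을 못만나면 리턴값은 항상 0 이상
-- ===== SOURCE B (Python) =====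
-- def Count_Zero(tmp_list):
--     if 3 in tmp_list:
--         return -1
--     return tmp_list.count(0)
-- ===== Notes on version B (the rewrite author's own statement) =====
-- stated objective: simpler
-- what changed: Replaces the single early-exit loop with accumulator and break flag by a membership test (3 in list) followed by list.count(0); correct because any 3 forces -1 and absence of 3 means every zero is counted.
import Mathlib
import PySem

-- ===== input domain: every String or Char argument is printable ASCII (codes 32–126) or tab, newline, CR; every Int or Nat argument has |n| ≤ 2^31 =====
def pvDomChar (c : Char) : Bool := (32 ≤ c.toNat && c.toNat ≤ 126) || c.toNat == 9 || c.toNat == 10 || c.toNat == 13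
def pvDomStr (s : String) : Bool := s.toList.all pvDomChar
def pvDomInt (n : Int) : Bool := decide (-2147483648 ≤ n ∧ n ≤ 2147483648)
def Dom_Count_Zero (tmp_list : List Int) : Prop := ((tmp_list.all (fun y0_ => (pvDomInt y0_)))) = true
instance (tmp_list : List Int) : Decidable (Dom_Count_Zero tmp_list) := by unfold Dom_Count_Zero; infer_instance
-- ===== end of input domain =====

-- B replaces A's early-exit loop (accumulator + break flag) with a membership test then a count; objective: simpler.


-- ===== PORT A =====
-- loop: fold over the list carrying (count_zero, three, broken); break modelled by the 'broken' flag
def countZeroLoop (tmp_list : List Int) : Int × Bool :=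
  tmp_list.foldl
    (fun st i =>
      if st.2 then st
      else if i = 0 then ((st.1.1 + 1, false), false)
      else if i = 3 then ((st.1.1, true), true)
      else st)
    (((0, false), false) : (Int × Bool) × Bool)
    |>.1

def Count_Zero (tmp_list : List Int) : Int :=
  let r := countZeroLoop tmp_list
  if r.2 then -1 else r.1

-- ===== PORT B =====
def Count_Zero_alt (tmp_list : List Int) : Int :=
  if (3 : Int) ∈ tmp_list then -1 else (PySem.List.count tmp_list 0 : Int)

-- ===== PRECONDITION & SPEC =====
def Spec_Count_Zero (tmp_list : List Int) (out : Int) : Prop := out = Count_Zero_alt tmp_list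
instance (tmp_list : List Int) (out : Int) : Decidable (Spec_Count_Zero tmp_list out) := by unfold Spec_Count_Zero; infer_instance

-- ===== CLAIM (what is proved, stated in full; the proofs are below) =====
def Claim_equal_Count_Zero : Prop := ∀ (tmp_list : List Int), Dom_Count_Zero tmp_list → Spec_Count_Zero tmp_list (Count_Zero tmp_list)

-- ===== LEMMAS AND PROOFS =====

-- ===== VERDICT (by name: the statement is the Claim_ definition above) =====
-- step function of A's loop, named for the proofs
def czStep (st : (Int × Bool) × Bool) (i : Int) : (Int × Bool) × Bool :=
  if st.2 then st
  else if i = 0 then ((st.1.1 + 1, false), false)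
  else if i = 3 then ((st.1.1, true), true)
  else st

lemma czStep_eq (l : List Int) (st : (Int × Bool) × Bool) :
    l.foldl
      (fun st i =>
        if st.2 then st
        else if i = 0 then ((st.1.1 + 1, false), false)
        else if i = 3 then ((st.1.1, true), true)
        else st) st = l.foldl czStep st := rfl

lemma cz_absorb (l : List Int) (c : Int) (b : Bool) :
    l.foldl czStep ((c, b), true) = ((c, b), true) := by
  induction l with
  | nil => rfl
  | cons x xs ih => simp [czStep, ih]

lemma cz_no3 (l : List Int) (c : Int) (h : (3 : Int) ∉ l) :
    l.foldl czStep ((c, false), false) = ((c + (l.count 0 : Int), false), false) := by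
  induction l generalizing c with
  | nil => simp
  | cons x xs ih =>
    simp only [List.mem_cons, not_or] at h
    by_cases hx : x = 0
    · simp [czStep, hx, ih _ h.2]
      ring
    · have h3 : x ≠ 3 := fun hh => h.1 hh.symm
      simp [czStep, hx, h3, ih _ h.2]

lemma cz_has3 (l : List Int) (c : Int) (h : (3 : Int) ∈ l) :
    ((l.foldl czStep ((c, false), false)).1.2 = true) := by
  induction l generalizing c with
  | nil => simp at h
  | cons x xs ih =>
    by_cases hx : x = 0
    · have h3 : (3:Int) ∈ xs := by
        rcases List.mem_cons.1 h with h' | h'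
        · omega
        · exact h'
      simp [czStep, hx]
      exact ih _ h3
    · by_cases h3 : x = 3
      · simp [czStep, h3, cz_absorb]
      · have hm : (3:Int) ∈ xs := by
          rcases List.mem_cons.1 h with h' | h'
          · exact absurd h'.symm h3
          · exact h'
        simp [czStep, hx, h3]
        exact ih _ hm

theorem Count_Zero_spec : Claim_equal_Count_Zero := by
  unfold Claim_equal_Count_Zero
  intro l _
  unfold Spec_Count_Zero Count_Zero Count_Zero_alt countZeroLoop
  rw [czStep_eq]
  by_cases h : (3 : Int) ∈ l
  · simp [cz_has3 l 0 h, h]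
  · simp [cz_no3 l 0 h, h, PySem.List.count]
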